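-- pv_equiv track=rewrite | github.com/harshraj172/CotIF | src/synthesize/hehe_partial_sol_datasyn.py | chunk_paragraphs
-- ===== SOURCE A (Python) =====
-- def chunk_paragraphs(paragraphs: list[str], keywords: list[str]) -> list[str]:
--     """
--     Groups paragraphs into chunks. A new chunk starts whenever a paragraph
--     contains any of the specified keywords (case-insensitive).
--     """
--     chunks = []
--     current_chunk = []
--     for para in paragraphs:
--         if any(kw.lower() in para.lower() for kw in keywords) and current_chunk:
--             chunks.append("\n\n".join(current_chunk))
--             current_chunk = [para]
--         else:
--             current_chunk.append(para)
--     if current_chunk: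
--         chunks.append("\n\n".join(current_chunk))
--     return chunks
-- ===== SOURCE B (Python) =====
-- def chunk_paragraphs(paragraphs: list[str], keywords: list[str]) -> list[str]:
--     """
--     Groups paragraphs into chunks. A new chunk starts whenever a paragraph
--     contains any of the specified keywords (case-insensitive).
--
--     Two passes: first collect the boundary indices where a new chunk begins,
--     then join the paragraph slices between consecutive boundaries.
--     """
--     if not paragraphs:
--         return []
--     lowered = [kw.lower() for kw in keywords]
--     bounds = [0]
--     for i in range(1, len(paragraphs)):
--         para = paragraphs[i].lower()
--         if any(kw in para for kw in lowered):
--             bounds.append(i)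
--     bounds.append(len(paragraphs))
--     return ["\n\n".join(paragraphs[s:e]) for s, e in zip(bounds, bounds[1:])]
-- ===== Notes on version B (the rewrite author's own statement) =====
-- stated objective: alternative
-- what changed: B is a two-pass index-then-slice reformulation: it first builds the list of chunk boundary indices (0, every keyword-hit index >= 1, and len(paragraphs)), then joins the paragraph slices between consecutive boundary pairs, instead of A's single accumulator loop that flushes current_chunk on each hit; B also lowercases the keywords once up front rather than once per paragraph.
import Mathlib
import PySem

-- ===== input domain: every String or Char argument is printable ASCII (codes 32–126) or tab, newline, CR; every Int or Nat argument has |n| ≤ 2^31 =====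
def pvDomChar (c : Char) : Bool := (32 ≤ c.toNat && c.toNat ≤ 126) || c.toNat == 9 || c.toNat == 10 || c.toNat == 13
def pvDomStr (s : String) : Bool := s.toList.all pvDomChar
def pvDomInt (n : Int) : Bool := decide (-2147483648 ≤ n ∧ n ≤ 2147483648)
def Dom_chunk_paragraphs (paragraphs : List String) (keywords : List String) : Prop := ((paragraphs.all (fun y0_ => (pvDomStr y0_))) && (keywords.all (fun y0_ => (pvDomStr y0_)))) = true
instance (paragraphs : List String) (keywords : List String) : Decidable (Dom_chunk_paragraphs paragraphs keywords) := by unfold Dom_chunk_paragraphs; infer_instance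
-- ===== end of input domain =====

-- B replaces A's running accumulator-and-flush loop by a two-pass index-then-slice shape
-- (collect boundary indices, then join the slices between consecutive boundaries); same cost.

-- ===== PORT A =====
-- any(kw.lower() in para.lower() for kw in keywords)
def pvHit (keywords : List String) (para : String) : Bool :=
  keywords.any (fun kw => PySem.Str.isIn (PySem.Str.lower kw) (PySem.Str.lower para))

def pvStepA (keywords : List String) (st : List String × List String) (para : String) :
    List String × List String :=
  if pvHit keywords para = true ∧ st.2 ≠ [] then
    (st.1 ++ [PySem.Str.join "\n\n" st.2], [para])
  else
    (st.1, st.2 ++ [para])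

def chunk_paragraphs (paragraphs : List String) (keywords : List String) : List String :=
  let fin := paragraphs.foldl (pvStepA keywords) ([], [])
  if fin.2 ≠ [] then fin.1 ++ [PySem.Str.join "\n\n" fin.2] else fin.1

-- ===== PORT B =====
def chunk_paragraphs_alt (paragraphs : List String) (keywords : List String) : List String :=
  if paragraphs = [] then []
  else
    let lowered := keywords.map PySem.Str.lower
    let n : Int := paragraphs.length
    -- bounds = [0]; for i in range(1, len(paragraphs)): if any(...): bounds.append(i)
    let bounds := (PySem.List.pyRange 1 n 1).foldl
      (fun bs i =>
        let para := PySem.Str.lower (PySem.List.pyGetD paragraphs i "")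
        if lowered.any (fun kw => PySem.Str.isIn kw para) then bs ++ [i] else bs)
      [(0 : Int)]
    let bounds := bounds ++ [n]
    -- ["\n\n".join(paragraphs[s:e]) for s, e in zip(bounds, bounds[1:])]
    (bounds.zip (PySem.List.slice bounds (some 1) none)).map
      (fun se => PySem.Str.join "\n\n" (PySem.List.slice paragraphs (some se.1) (some se.2)))

-- ===== PRECONDITION & SPEC =====
def Spec_chunk_paragraphs (paragraphs : List String) (keywords : List String) (out : List String) : Prop := out = chunk_paragraphs_alt paragraphs keywords
instance (paragraphs : List String) (keywords : List String) (out : List String) : Decidable (Spec_chunk_paragraphs paragraphs keywords out) := by unfold Spec_chunk_paragraphs; infer_instance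

-- ===== CLAIM (what is proved, stated in full; the proofs are below) =====
def Claim_equal_chunk_paragraphs : Prop := ∀ (paragraphs : List String) (keywords : List String), Dom_chunk_paragraphs paragraphs keywords → Spec_chunk_paragraphs paragraphs keywords (chunk_paragraphs paragraphs keywords)

-- ===== LEMMAS AND PROOFS =====

-- reference grouping function A is reduced to
def pvGrp (keywords : List String) (cur : List String) : List String → List String
  | [] => [PySem.Str.join "\n\n" cur]
  | p :: ps =>
    if pvHit keywords p = true then PySem.Str.join "\n\n" cur :: pvGrp keywords [p] ps
    else pvGrp keywords (cur ++ [p]) ps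

theorem pvA_eq_grp (keywords : List String) :
    ∀ (ps : List String) (chunks cur : List String), cur ≠ [] →
    (let fin := ps.foldl (pvStepA keywords) (chunks, cur);
     if fin.2 ≠ [] then fin.1 ++ [PySem.Str.join "\n\n" fin.2] else fin.1)
    = chunks ++ pvGrp keywords cur ps := by
  intro ps
  induction ps with
  | nil =>
    intro chunks cur h
    simp [pvGrp, h]
  | cons p ps ih =>
    intro chunks cur h
    by_cases hp : pvHit keywords p = true
    · have : pvStepA keywords (chunks, cur) p
          = (chunks ++ [PySem.Str.join "\n\n" cur], [p]) := by
        simp [pvStepA, hp, h]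
      simp only [List.foldl_cons, this]
      rw [ih _ [p] (by simp)]
      simp [pvGrp, hp]
    · have : pvStepA keywords (chunks, cur) p = (chunks, cur ++ [p]) := by
        simp [pvStepA, hp]
      simp only [List.foldl_cons, this]
      rw [ih chunks (cur ++ [p]) (by simp)]
      simp [pvGrp, hp]

-- B's chunk build from a boundary index list, written recursively
def pvGrpIdx (full : List String) (n : Int) : Int → List Int → List String
  | s, [] => [PySem.Str.join "\n\n" (PySem.List.slice full (some s) (some n))]
  | s, i :: is =>
    PySem.Str.join "\n\n" (PySem.List.slice full (some s) (some i)) :: pvGrpIdx full n i is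

-- the zip-of-consecutive-pairs map equals the recursive build
theorem pvZip_eq_grpIdx (full : List String) (n : Int) :
    ∀ (hs : List Int) (s : Int),
    (((s :: hs ++ [n]).zip (hs ++ [n])).map
      (fun se => PySem.Str.join "\n\n" (PySem.List.slice full (some se.1) (some se.2))))
    = pvGrpIdx full n s hs := by
  intro hs
  induction hs with
  | nil => intro s; simp [pvGrpIdx]
  | cons i is ih => intro s; simpa [pvGrpIdx] using ih i

-- B's hit test at index i equals A's hit test on the paragraph there
theorem pvHit_map_lower (keywords : List String) (p : String) :
    ((keywords.map PySem.Str.lower).any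
      (fun kw => PySem.Str.isIn kw (PySem.Str.lower p))) = pvHit keywords p := by
  simp [pvHit, List.any_map, Function.comp_def, PySem.Str.toList_lower]

-- main bridge: the grouping of the suffix equals the index-table build
theorem pvGrp_eq_grpIdx (keywords full : List String) :
    ∀ (rest : List String) (b s : Nat), b < s → full.drop s = rest →
    pvGrp keywords (PySem.List.slice full (some (b : Int)) (some (s : Int))) rest
      = pvGrpIdx full (full.length : Int) (b : Int)
          ((PySem.List.pyRange (s : Int) (full.length : Int) 1).filter
            (fun i => pvHit keywords (PySem.List.pyGetD full i ""))) := by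
  intro rest
  induction rest with
  | nil =>
    intro b s hbs hdrop
    have hn : full.length ≤ s := by
      rw [← List.drop_eq_nil_iff]
      exact hdrop
    rw [PySem.List.pyRange_one_eq_nil (by omega)]
    simp only [List.filter_nil, pvGrpIdx, pvGrp]
    rw [PySem.List.slice_natCast, PySem.List.slice_natCast]
    rw [List.take_of_length_le (by simp only [List.length_drop]; omega),
      List.take_of_length_le (by simp only [List.length_drop]; omega)]
  | cons p ps ih =>
    intro b s hbs hdrop
    have hs : s < full.length := by
      by_contra h
      rw [List.drop_eq_nil_of_le (by omega)] at hdrop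
      simp at hdrop
    have hget : full[s]? = some p := by
      have h0 : (full.drop s)[0]? = some p := by rw [hdrop]; rfl
      rw [List.getElem?_drop] at h0
      simpa using h0
    have hgetD : PySem.List.pyGetD full (s : Int) "" = p := by
      rw [PySem.List.pyGetD_natCast, List.getD_eq_getElem?_getD, hget]
      rfl
    have hdrop' : full.drop (s + 1) = ps := by
      have : full.drop (s + 1) = (full.drop s).drop 1 := by
        rw [List.drop_drop]
      rw [this, hdrop]; rfl
    rw [PySem.List.pyRange_one_cons (by exact_mod_cast hs)]
    have hcast : ((s : Int) + 1) = ((s + 1 : Nat) : Int) := by push_cast; ring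
    by_cases hp : pvHit keywords p = true
    · have hcur1 : PySem.List.slice full (some ((s : Nat) : Int)) (some ((s + 1 : Nat) : Int))
          = [p] := by
        rw [PySem.List.slice_natCast, hdrop]
        simp
      have hI := ih s (s + 1) (by omega) hdrop'
      rw [hcur1] at hI
      simp only [List.filter_cons, hgetD]
      rw [if_pos hp]
      simp only [pvGrp]
      rw [if_pos hp]
      simp only [pvGrpIdx]
      rw [hcast, hI]
    · have hcur : PySem.List.slice full (some (b : Int)) (some ((s : Nat) : Int)) ++ [p]
          = PySem.List.slice full (some (b : Int)) (some ((s + 1 : Nat) : Int)) := by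
        rw [PySem.List.slice_natCast, PySem.List.slice_natCast]
        have h1 : s + 1 - b = (s - b) + 1 := by omega
        rw [h1, List.take_add_one]
        have : (full.drop b)[s - b]? = some p := by
          rw [List.getElem?_drop]
          have : b + (s - b) = s := by omega
          rw [this, hget]
        simp [this]
      have hI := ih b (s + 1) (by omega) hdrop'
      simp only [List.filter_cons, hgetD]
      rw [if_neg hp]
      simp only [pvGrp]
      rw [if_neg hp]
      rw [hcur, hcast]
      exact hI

-- B unfolded on a nonempty input to the recursive index build
theorem pvB_eq_grpIdx (keywords : List String) (p0 : String) (rest : List String) :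
    chunk_paragraphs_alt (p0 :: rest) keywords
      = pvGrpIdx (p0 :: rest) ((p0 :: rest).length : Int) 0
          ((PySem.List.pyRange 1 ((p0 :: rest).length : Int) 1).filter
            (fun i => pvHit keywords (PySem.List.pyGetD (p0 :: rest) i ""))) := by
  unfold chunk_paragraphs_alt
  rw [if_neg (by simp)]
  simp only [PySem.List.foldl_append_if, PySem.List.slice_from_one]
  have hfilter :
      (PySem.List.pyRange 1 ((p0 :: rest).length : Int) 1).filter
        (fun i => (keywords.map PySem.Str.lower).any
          (fun kw => PySem.Str.isIn kw (PySem.Str.lower (PySem.List.pyGetD (p0 :: rest) i ""))))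
      = (PySem.List.pyRange 1 ((p0 :: rest).length : Int) 1).filter
        (fun i => pvHit keywords (PySem.List.pyGetD (p0 :: rest) i "")) := by
    apply List.filter_congr
    intro i _
    rw [pvHit_map_lower]
  rw [hfilter]
  have := pvZip_eq_grpIdx (p0 :: rest) ((p0 :: rest).length : Int)
    ((PySem.List.pyRange 1 ((p0 :: rest).length : Int) 1).filter
      (fun i => pvHit keywords (PySem.List.pyGetD (p0 :: rest) i ""))) 0
  simpa using this

-- ===== VERDICT (by name: the statement is the Claim_ definition above) =====
theorem chunk_paragraphs_spec : Claim_equal_chunk_paragraphs := by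
  intro paragraphs keywords _
  unfold Spec_chunk_paragraphs
  cases paragraphs with
  | nil => simp [chunk_paragraphs, chunk_paragraphs_alt]
  | cons p0 rest =>
    have hA : chunk_paragraphs (p0 :: rest) keywords = [] ++ pvGrp keywords [p0] rest := by
      have h0 : pvStepA keywords ([], []) p0 = ([], [p0]) := by
        simp [pvStepA]
      unfold chunk_paragraphs
      simp only [List.foldl_cons, h0]
      exact pvA_eq_grp keywords rest [] [p0] (by simp)
    rw [hA, pvB_eq_grpIdx]
    have hcur : PySem.List.slice (p0 :: rest) (some ((0 : Nat) : Int)) (some ((1 : Nat) : Int))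
        = [p0] := by
      rw [PySem.List.slice_natCast]; simp
    have := pvGrp_eq_grpIdx keywords (p0 :: rest) rest 0 1 (by omega) (by simp)
    rw [hcur] at this
    simpa using this
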